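-- pv_equiv track=rewrite | github.com/osk4r8088/hashguard-os | main.py | is_sequential
-- ===== SOURCE A (Python) =====
-- def is_sequential(s: str, ascending: bool = True) -> bool:
--     if len(s) < 2:
--         return False
--     step = 1 if ascending else -1
--     for i in range(len(s) - 1):
--         if ord(s[i+1]) - ord(s[i]) != step:
--             return False
--     return True
-- ===== SOURCE B (Python) =====
-- def is_sequential(s: str, ascending: bool = True) -> bool:
--     if len(s) < 2:
--         return False
--     step = 1 if ascending else -1
--     start = ord(s[0])
--     return [ord(c) for c in s] == list(range(start, start + len(s) * step, step))
-- ===== Notes on version B (the rewrite author's own statement) =====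
-- stated objective: alternative
-- what changed: B builds the full expected arithmetic code-point sequence with range() and compares it to the actual code points in bulk, instead of A's index loop over consecutive differences with early exit.
import Mathlib
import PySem

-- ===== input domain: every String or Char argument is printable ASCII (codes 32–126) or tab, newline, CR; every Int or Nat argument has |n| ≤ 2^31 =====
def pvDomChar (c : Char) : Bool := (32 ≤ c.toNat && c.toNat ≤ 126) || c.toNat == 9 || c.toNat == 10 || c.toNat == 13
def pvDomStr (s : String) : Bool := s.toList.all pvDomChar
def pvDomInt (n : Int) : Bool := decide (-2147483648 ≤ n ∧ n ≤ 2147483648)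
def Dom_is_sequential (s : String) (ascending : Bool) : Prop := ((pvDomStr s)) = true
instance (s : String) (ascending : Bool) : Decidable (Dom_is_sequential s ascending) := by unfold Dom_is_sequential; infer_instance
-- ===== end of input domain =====

-- B rebuilds the expected arithmetic code-point sequence with range() and compares in bulk;
-- A scans consecutive differences with early exit. Same values on every input (alternative decomposition).

-- ===== PORT A =====
-- the 'for i in range(len(s)-1)' loop over consecutive pairs, with early return False
def pvChkA : List Char → Int → Bool
  | c1 :: c2 :: rest, step =>
      if ((c2.toNat : Int) - (c1.toNat : Int)) ≠ step then false
      else pvChkA (c2 :: rest) step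
  | _, _ => true

def is_sequential (s : String) (ascending : Bool) : Bool :=
  if s.toList.length < 2 then false
  else pvChkA s.toList (if ascending then 1 else -1)

-- ===== PORT B =====
def is_sequential_alt (s : String) (ascending : Bool) : Bool :=
  if s.toList.length < 2 then false
  else
    -- step = 1 if ascending else -1; start = ord(s[0]) (guard ensures nonempty)
    decide (s.toList.map (fun c => (c.toNat : Int)) =
            PySem.List.pyRange ((s.toList.headD ' ').toNat : Int)
              (((s.toList.headD ' ').toNat : Int)
                + (s.toList.length : Int) * (if ascending then 1 else -1))
              (if ascending then 1 else -1))

-- ===== PRECONDITION & SPEC =====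
def Spec_is_sequential (s : String) (ascending : Bool) (out : Bool) : Prop := out = is_sequential_alt s ascending
instance (s : String) (ascending : Bool) (out : Bool) : Decidable (Spec_is_sequential s ascending out) := by unfold Spec_is_sequential; infer_instance

-- ===== CLAIM (what is proved, stated in full; the proofs are below) =====
def Claim_equal_is_sequential : Prop := ∀ (s : String) (ascending : Bool), Dom_is_sequential s ascending → Spec_is_sequential s ascending (is_sequential s ascending)

-- ===== LEMMAS AND PROOFS =====

lemma pvChk1 : ∀ (l : List Char) (c : Char),
    pvChkA (c :: l) 1 =
      decide ((c :: l).map (fun x => (x.toNat : Int)) =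
        PySem.List.pyRange (c.toNat : Int) ((c.toNat : Int) + (1 + (l.length : Int))) 1) := by
  intro l
  induction l with
  | nil =>
      intro c
      rw [show ((c.toNat : Int) + (1 + (([] : List Char).length : Int))) = (c.toNat : Int) + 1 by
            push_cast [List.length_nil]; ring]
      rw [PySem.List.pyRange_one_singleton]
      simp [pvChkA]
  | cons d rest ih =>
      intro c
      rw [PySem.List.pyRange_one_cons (by push_cast [List.length_cons]; omega)]
      by_cases h : ((d.toNat : Int) - (c.toNat : Int)) = 1
      · have hd : (c.toNat : Int) + 1 = (d.toNat : Int) := by omega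
        rw [show ((c.toNat : Int) + (1 + (((d :: rest) : List Char).length : Int)))
              = (d.toNat : Int) + (1 + (rest.length : Int)) from by push_cast [List.length_cons]; omega,
            hd,
            show pvChkA (c :: d :: rest) 1 = pvChkA (d :: rest) 1 from by simp [pvChkA, h],
            ih d]
        simp
      · rw [show pvChkA (c :: d :: rest) 1 = false from by simp [pvChkA, h]]
        have hne : ¬ ((d.toNat : Int) = (c.toNat : Int) + 1) := by omega
        simp only [List.map_cons, List.cons_eq_cons, decide_eq_true_eq, eq_self_iff_true,
          true_and, eq_comm, false_eq_decide_iff, not_and]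
        intro hhd
        rw [PySem.List.pyRange_one_cons (by push_cast [List.length_cons]; omega)] at hhd
        exact hne (by injection hhd with h1 _; omega)

lemma pvChkNeg : ∀ (l : List Char) (c : Char),
    pvChkA (c :: l) (-1) =
      decide ((c :: l).map (fun x => (x.toNat : Int)) =
        PySem.List.pyRange (c.toNat : Int) ((c.toNat : Int) - (1 + (l.length : Int))) (-1)) := by
  intro l
  induction l with
  | nil =>
      intro c
      rw [PySem.List.pyRange_neg_one_cons (by push_cast [List.length_nil]; omega),
          PySem.List.pyRange_neg_one_eq_nil (by push_cast [List.length_nil]; omega)]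
      simp [pvChkA]
  | cons d rest ih =>
      intro c
      rw [PySem.List.pyRange_neg_one_cons (by push_cast [List.length_cons]; omega)]
      by_cases h : ((d.toNat : Int) - (c.toNat : Int)) = -1
      · have hd : (c.toNat : Int) - 1 = (d.toNat : Int) := by omega
        rw [show ((c.toNat : Int) - (1 + (((d :: rest) : List Char).length : Int)))
              = (d.toNat : Int) - (1 + (rest.length : Int)) from by push_cast [List.length_cons]; omega,
            hd,
            show pvChkA (c :: d :: rest) (-1) = pvChkA (d :: rest) (-1) from by simp [pvChkA, h],
            ih d]
        simp
      · rw [show pvChkA (c :: d :: rest) (-1) = false from by simp [pvChkA, h]]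
        have hne : ¬ ((d.toNat : Int) = (c.toNat : Int) - 1) := by omega
        simp only [List.map_cons, List.cons_eq_cons, decide_eq_true_eq, eq_self_iff_true,
          true_and, eq_comm, false_eq_decide_iff, not_and]
        intro hhd
        rw [PySem.List.pyRange_neg_one_cons (by push_cast [List.length_cons]; omega)] at hhd
        exact hne (by injection hhd with h1 _; omega)

-- ===== VERDICT (by name: the statement is the Claim_ definition above) =====
theorem is_sequential_spec : Claim_equal_is_sequential := by
  intro s ascending _
  unfold Spec_is_sequential is_sequential is_sequential_alt
  by_cases hlen : s.toList.length < 2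
  · rw [if_pos hlen, if_pos hlen]
  · rw [if_neg hlen, if_neg hlen]
    obtain ⟨c, l, hcl⟩ : ∃ c l, s.toList = c :: l := by
      cases h : s.toList with
      | nil => rw [h] at hlen; simp at hlen
      | cons c l => exact ⟨c, l, rfl⟩
    rw [hcl]
    cases ascending with
    | true =>
        rw [show (if (true : Bool) = true then (1:Int) else -1) = 1 from rfl,
            pvChk1,
            show (((c :: l).headD ' ').toNat : Int) = (c.toNat : Int) from rfl,
            show ((c.toNat : Int) + ((((c :: l)) : List Char).length : Int) * 1)
              = (c.toNat : Int) + (1 + (l.length : Int)) from by push_cast [List.length_cons]; ring]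
    | false =>
        rw [show (if (false : Bool) = true then (1:Int) else -1) = -1 from rfl,
            pvChkNeg,
            show (((c :: l).headD ' ').toNat : Int) = (c.toNat : Int) from rfl,
            show ((c.toNat : Int) + ((((c :: l)) : List Char).length : Int) * (-1))
              = (c.toNat : Int) - (1 + (l.length : Int)) from by push_cast [List.length_cons]; ring]
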